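-- pv_equiv track=rewrite | github.com/CZboop/Challenges-and-Interview-Question-Practice | codesignal/python/Are Similar.py | solution
-- ===== SOURCE A (Python) =====
-- def solution(a, b):
--     inds = []
--
--     x = [a.count(i) for i in sorted(set(a))]
--     y = [b.count(i) for i in sorted(set(b))]
--
--     for c,v in enumerate(a):
--         if v!=b[c]:
--             inds.append(c)
--
--     return len(inds) in [0,2] and set(a)==set(b) and x==y
-- ===== SOURCE B (Python) =====
-- def solution(a, b):
--     diff = [i for i in range(len(a)) if a[i] != b[i]]
--     return len(diff) in (0, 2) and sorted(a) == sorted(b)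
-- ===== Notes on version B (the rewrite author's own statement) =====
-- stated objective: faster
-- what changed: Replaces A's two count-tables built by repeated .count scans over sorted(set(..)) plus a set-equality test with a single sorted(a)==sorted(b) comparison, and builds the mismatch-index list with one range comprehension instead of an enumerate loop with an accumulator.
import Mathlib
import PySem

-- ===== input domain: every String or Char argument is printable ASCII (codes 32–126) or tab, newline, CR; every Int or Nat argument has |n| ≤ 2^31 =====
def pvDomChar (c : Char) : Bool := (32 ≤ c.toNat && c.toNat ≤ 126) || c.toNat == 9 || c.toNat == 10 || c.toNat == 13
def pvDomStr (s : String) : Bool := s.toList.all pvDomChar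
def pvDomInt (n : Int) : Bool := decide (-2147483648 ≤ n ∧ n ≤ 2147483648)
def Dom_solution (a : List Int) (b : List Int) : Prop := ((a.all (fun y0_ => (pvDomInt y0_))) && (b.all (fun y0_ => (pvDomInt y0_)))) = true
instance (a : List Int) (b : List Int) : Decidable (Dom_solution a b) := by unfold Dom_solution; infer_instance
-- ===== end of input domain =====

-- B replaces A's two count-tables over sorted distinct elements plus set-equality test
-- by a single sorted-list comparison (faster: O(n log n) vs A's repeated-.count O(n^2)).

-- ===== PORT A =====
def solution (a : List Int) (b : List Int) : Bool :=
  -- x = [a.count(i) for i in sorted(set(a))] ; y likewise for b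
  let x := (PySem.List.sorted (PySem.Set.ofList a) (fun i => i) false).map
              (fun i => (PySem.List.count a i : Int))
  let y := (PySem.List.sorted (PySem.Set.ofList b) (fun i => i) false).map
              (fun i => (PySem.List.count b i : Int))
  -- for c,v in enumerate(a): if v != b[c]: inds.append(c)   (b[c] raises outside Pre_)
  let inds := (PySem.List.enumerate a).foldl
      (fun acc cv => if (some cv.2 : Option Int) ≠ PySem.List.pyGet? b cv.1
                     then acc ++ [cv.1] else acc) []
  [(0 : Int), 2].contains (inds.length : Int)
    && (PySem.Set.equal (PySem.Set.ofList a) (PySem.Set.ofList b) && decide (x = y))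

-- ===== PORT B =====
def solution_alt (a : List Int) (b : List Int) : Bool :=
  -- diff = [i for i in range(len(a)) if a[i] != b[i]]   (b[i] raises outside Pre_)
  let diff := (PySem.List.pyRange 0 (a.length : Int) 1).filter
      (fun i => decide (PySem.List.pyGet? a i ≠ PySem.List.pyGet? b i))
  [(0 : Int), 2].contains (diff.length : Int)
    && decide (PySem.List.sorted a (fun i => i) false = PySem.List.sorted b (fun i => i) false)

-- ===== PRECONDITION & SPEC =====
-- Python A raises IndexError at b[c] exactly when len(a) > len(b); excluded here (B raises there too).
def Pre_solution (a : List Int) (b : List Int) : Prop := a.length ≤ b.length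
instance (a : List Int) (b : List Int) : Decidable (Pre_solution a b) := by unfold Pre_solution; infer_instance
def pvWitness_solution : List Int × List Int := ([1, 2, 3], [2, 1, 3])

def Spec_solution (a : List Int) (b : List Int) (out : Bool) : Prop := out = solution_alt a b
instance (a : List Int) (b : List Int) (out : Bool) : Decidable (Spec_solution a b out) := by unfold Spec_solution; infer_instance

-- ===== CLAIM (what is proved, stated in full; the proofs are below) =====
def Claim_equal_solution : Prop := ∀ (a : List Int) (b : List Int), Dom_solution a b → Pre_solution a b → Spec_solution a b (solution a b)

-- ===== LEMMAS AND PROOFS =====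

-- the mismatch-index list both loops compute, as one structural recursion
def pvMism (b : List Int) : List Int → Int → List Int
  | [], _ => []
  | v :: t, i =>
      if (some v : Option Int) ≠ PySem.List.pyGet? b i
      then i :: pvMism b t (i + 1) else pvMism b t (i + 1)

theorem pvMism_A (b : List Int) : ∀ (a : List Int) (i : Int),
    ((PySem.List.enumerate a i).filter
        (fun cv => decide ((some cv.2 : Option Int) ≠ PySem.List.pyGet? b cv.1))).map (·.1)
      = pvMism b a i := by
  intro a
  induction a with
  | nil => intro i; simp [PySem.List.enumerate_nil, pvMism]
  | cons v t ih =>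
      intro i
      rw [PySem.List.enumerate_cons]
      by_cases h : (some v : Option Int) ≠ PySem.List.pyGet? b i
      · simp [pvMism, h]
        simpa using ih (i + 1)
      · simp [pvMism, h]
        simpa using ih (i + 1)

theorem pvMism_B (b : List Int) : ∀ (a pre : List Int),
    (PySem.List.pyRange (pre.length : Int) ((pre.length : Int) + a.length) 1).filter
        (fun i => decide (PySem.List.pyGet? (pre ++ a) i ≠ PySem.List.pyGet? b i))
      = pvMism b a pre.length := by
  intro a
  induction a with
  | nil => intro pre; simp [PySem.List.pyRange, pvMism]
  | cons v t ih =>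
      intro pre
      rw [PySem.List.pyRange_one_cons (by push_cast [List.length_cons]; omega)]
      have hpre : PySem.List.pyGet? (pre ++ v :: t) (pre.length : Int) = some v :=
        PySem.List.pyGet?_append_length pre t v
      have htail := ih (pre ++ [v])
      have h1 : ((pre ++ [v]).length : Int) = (pre.length : Int) + 1 := by
        simp
      have h2 : (pre ++ [v]) ++ t = pre ++ v :: t := by simp
      rw [h1, h2] at htail
      have h3 : ((pre.length : Int) + 1) + (t.length : Int)
          = (pre.length : Int) + ((v :: t).length : Int) := by push_cast [List.length_cons]; ring
      rw [h3] at htail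
      rw [List.filter_cons, hpre]
      by_cases h : (some v : Option Int) ≠ PySem.List.pyGet? b (pre.length : Int)
      · rw [if_pos (decide_eq_true h), pvMism, if_pos h, htail]
      · rw [if_neg (by simpa using h), pvMism, if_neg h, htail]

-- the two mismatch-index lists coincide
theorem pv_inds_eq_diff (a b : List Int) :
    ((PySem.List.enumerate a).filter
        (fun cv => decide ((some cv.2 : Option Int) ≠ PySem.List.pyGet? b cv.1))).map (·.1)
      = (PySem.List.pyRange 0 (a.length : Int) 1).filter
          (fun i => decide (PySem.List.pyGet? a i ≠ PySem.List.pyGet? b i)) := by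
  have hb := pvMism_B b a []
  simp only [List.length_nil, Nat.cast_zero, zero_add, List.nil_append] at hb
  exact (pvMism_A b a 0).trans hb.symm

-- A's multiset test (set equality + count lists) decides exactly permutation
theorem pv_multiset_iff (a b : List Int) :
    (PySem.Set.equal (PySem.Set.ofList a) (PySem.Set.ofList b)
      && decide ((PySem.List.sorted (PySem.Set.ofList a) (fun i => i) false).map
                    (fun i => (PySem.List.count a i : Int))
                 = (PySem.List.sorted (PySem.Set.ofList b) (fun i => i) false).map
                    (fun i => (PySem.List.count b i : Int)))) = true
    ↔ a.Perm b := by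
  constructor
  · rintro h
    rw [Bool.and_eq_true, decide_eq_true_iff] at h
    obtain ⟨hset, hxy⟩ := h
    have hmem : ∀ x : Int, x ∈ PySem.Set.ofList a ↔ x ∈ PySem.Set.ofList b :=
      (PySem.Set.equal_iff _ _).1 hset
    have hperm : (PySem.Set.ofList a).Perm (PySem.Set.ofList b) :=
      (List.perm_ext_iff_of_nodup (PySem.Set.nodup_ofList a) (PySem.Set.nodup_ofList b)).2 hmem
    have hL : PySem.List.sorted (PySem.Set.ofList a) (fun i => i) false
            = PySem.List.sorted (PySem.Set.ofList b) (fun i => i) false :=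
      PySem.List.sorted_eq_sorted_of_perm _ _ _ (fun _ _ h => h) hperm
    rw [← hL] at hxy
    have hcount : ∀ v ∈ PySem.List.sorted (PySem.Set.ofList a) (fun i => i) false,
        (PySem.List.count a v : Int) = (PySem.List.count b v : Int) :=
      List.map_eq_map_iff.1 hxy
    rw [List.perm_iff_count]
    intro v
    by_cases hv : v ∈ a
    · have : v ∈ PySem.List.sorted (PySem.Set.ofList a) (fun i => i) false := by
        rw [PySem.List.mem_sorted, PySem.Set.mem_ofList]; exact hv
      exact_mod_cast hcount v this
    · have hvb : v ∉ b := by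
        intro hb
        exact hv ((PySem.Set.mem_ofList _ _).1 ((hmem v).2 ((PySem.Set.mem_ofList _ _).2 hb)))
      simp [List.count_eq_zero_of_not_mem, hv, hvb]
  · intro hperm
    rw [Bool.and_eq_true, decide_eq_true_iff]
    have hmem : ∀ x : Int, x ∈ PySem.Set.ofList a ↔ x ∈ PySem.Set.ofList b := by
      intro x; rw [PySem.Set.mem_ofList, PySem.Set.mem_ofList]; exact ⟨hperm.mem_iff.1, hperm.mem_iff.2⟩
    refine ⟨(PySem.Set.equal_iff _ _).2 hmem, ?_⟩
    have hsperm : (PySem.Set.ofList a).Perm (PySem.Set.ofList b) :=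
      (List.perm_ext_iff_of_nodup (PySem.Set.nodup_ofList a) (PySem.Set.nodup_ofList b)).2 hmem
    have hL : PySem.List.sorted (PySem.Set.ofList a) (fun i => i) false
            = PySem.List.sorted (PySem.Set.ofList b) (fun i => i) false :=
      PySem.List.sorted_eq_sorted_of_perm _ _ _ (fun _ _ h => h) hsperm
    rw [← hL]
    exact List.map_congr_left (fun v _ => by
      simp [PySem.List.count_eq, hperm.count_eq])

-- ===== VERDICT (by name: the statement is the Claim_ definition above) =====
theorem solution_spec : Claim_equal_solution := by
  intro a b _ _
  unfold Spec_solution solution solution_alt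
  simp only []
  rw [PySem.List.foldl_append_ite
        (p := fun cv : Int × Int => (some cv.2 : Option Int) ≠ PySem.List.pyGet? b cv.1)
        (f := fun cv : Int × Int => cv.1)]
  simp only [List.nil_append]
  rw [pv_inds_eq_diff]
  congr 1
  by_cases hperm : a.Perm b
  · rw [(pv_multiset_iff a b).2 hperm]
    rw [decide_eq_true ((PySem.List.sorted_id_eq_sorted_id_iff_perm a b).2 hperm)]
  · have h1 : (PySem.Set.equal (PySem.Set.ofList a) (PySem.Set.ofList b)
      && decide ((PySem.List.sorted (PySem.Set.ofList a) (fun i => i) false).map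
                    (fun i => (PySem.List.count a i : Int))
                 = (PySem.List.sorted (PySem.Set.ofList b) (fun i => i) false).map
                    (fun i => (PySem.List.count b i : Int)))) = false := by
      rw [← Bool.not_eq_true]; intro h; exact hperm ((pv_multiset_iff a b).1 h)
    rw [h1]
    have h2 : ¬ PySem.List.sorted a (fun i => i) false = PySem.List.sorted b (fun i => i) false := by
      intro h; exact hperm ((PySem.List.sorted_id_eq_sorted_id_iff_perm a b).1 h)
    simp [h2]
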